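-- pv_equiv track=rewrite | github.com/itcosplay/quiz_bot | upload_questions.py | get_text_by_index
-- ===== SOURCE A (Python) =====
-- def get_text_by_index(list, start_index):
--     text = ''
--
--     for index in range(start_index, len(list)):
--         if list[index-1].startswith('\n'):
--             return text[:-1]
--
--         elif not list[index].startswith('\n'):
--             text += list[index]
--             text = text.replace('\n', ' ')
-- ===== SOURCE B (Python) =====
-- def get_text_by_index(list, start_index):
--     # Pass 1: find the stop boundary (first index whose predecessor starts with '\n').
--     stop = None
--     for i in range(start_index, len(list)):
--         if list[i - 1].startswith('\n'):
--             stop = i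
--             break
--     if stop is None:
--         return None
--     # Pass 2: build the text in one go from the slice before the boundary.
--     parts = [list[j] for j in range(start_index, stop) if not list[j].startswith('\n')]
--     return ''.join(parts).replace('\n', ' ')[:-1]
-- ===== Notes on version B (the rewrite author's own statement) =====
-- stated objective: faster
-- what changed: B splits A's single accumulate-and-replace loop into two passes: first find the stop boundary (first index whose predecessor starts with a newline), then build the result once by joining the non-newline-prefixed items of the slice and applying one replace and one trim, instead of re-running replace over the growing accumulator on every iteration.
import Mathlib
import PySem

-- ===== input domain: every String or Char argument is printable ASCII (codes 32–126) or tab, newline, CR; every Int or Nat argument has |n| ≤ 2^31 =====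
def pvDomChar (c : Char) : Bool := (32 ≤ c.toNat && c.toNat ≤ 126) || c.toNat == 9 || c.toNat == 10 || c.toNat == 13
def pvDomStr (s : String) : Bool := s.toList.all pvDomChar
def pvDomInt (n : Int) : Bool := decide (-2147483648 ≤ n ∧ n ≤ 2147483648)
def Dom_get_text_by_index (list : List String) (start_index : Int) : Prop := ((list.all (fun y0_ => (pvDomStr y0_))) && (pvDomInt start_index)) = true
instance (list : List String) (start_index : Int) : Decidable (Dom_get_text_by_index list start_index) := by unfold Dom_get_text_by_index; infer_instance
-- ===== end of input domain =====

-- B separates boundary-finding from string construction (find stop, then join-filter-replace once)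
-- instead of A's loop that re-runs replace over the growing accumulator each iteration (measured faster).

-- ===== PORT A =====
-- the for-loop of A over range(start_index, len(list)), carrying the accumulator `text`;
-- falling off the loop returns None; pyGet? none = IndexError (excluded by Pre_)
def pvLoopA (list : List String) (idxs : List Int) (text : String) : Option String :=
  match idxs with
  | [] => none
  | index :: rest =>
    match PySem.List.pyGet? list (index - 1) with
    | none => none  -- IndexError on list[index-1]
    | some prev =>
      if PySem.Str.startswith prev "\n" then
        some (PySem.Str.slice text none (some (-1)))
      else
        match PySem.List.pyGet? list index with
        | none => none  -- IndexError on list[index]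
        | some cur =>
          if !PySem.Str.startswith cur "\n" then
            pvLoopA list rest (PySem.Str.replace (text ++ cur) "\n" " ")
          else
            pvLoopA list rest text

def get_text_by_index (list : List String) (start_index : Int) : Option String :=
  pvLoopA list (PySem.List.pyRange start_index (list.length : Int) 1) ""

-- ===== PORT B =====
-- pass 1 of B: first i in idxs with list[i-1].startswith('\n'); none = fell off (or IndexError)
def pvFindStop (list : List String) (idxs : List Int) : Option Int :=
  match idxs with
  | [] => none
  | i :: rest =>
    match PySem.List.pyGet? list (i - 1) with
    | none => none  -- IndexError on list[i-1]
    | some prev =>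
      if PySem.Str.startswith prev "\n" then some i else pvFindStop list rest

def get_text_by_index_alt (list : List String) (start_index : Int) : Option String :=
  match pvFindStop list (PySem.List.pyRange start_index (list.length : Int) 1) with
  | none => none
  | some stop =>
    let parts := (PySem.List.pyRange start_index stop 1).filterMap (fun j =>
      match PySem.List.pyGet? list j with
      | none => none
      | some s => if PySem.Str.startswith s "\n" then none else some s)
    some (PySem.Str.slice (PySem.Str.replace (PySem.Str.join "" parts) "\n" " ") none (some (-1)))

-- ===== PRECONDITION & SPEC =====
-- Pre_ excludes exactly the inputs where A raises IndexError: a first iteration whose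
-- list[index-1] access is below -len(list) (start_index < 1 - len and start_index < len).
def Pre_get_text_by_index (list : List String) (start_index : Int) : Prop :=
  1 - (list.length : Int) ≤ start_index ∨ (list.length : Int) ≤ start_index
instance (list : List String) (start_index : Int) : Decidable (Pre_get_text_by_index list start_index) := by unfold Pre_get_text_by_index; infer_instance

def pvWitness_get_text_by_index : List String × Int := (["a\nb", "c", "\n", "d"], 0)

def Spec_get_text_by_index (list : List String) (start_index : Int) (out : Option String) : Prop := out = get_text_by_index_alt list start_index
instance (list : List String) (start_index : Int) (out : Option String) : Decidable (Spec_get_text_by_index list start_index out) := by unfold Spec_get_text_by_index; infer_instance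

-- ===== CLAIM (what is proved, stated in full; the proofs are below) =====
def Claim_equal_get_text_by_index : Prop := ∀ (list : List String) (start_index : Int), Dom_get_text_by_index list start_index → Pre_get_text_by_index list start_index → Spec_get_text_by_index list start_index (get_text_by_index list start_index)

-- ===== LEMMAS AND PROOFS =====

-- '\n' ↦ ' ' as a character map
def pvSubst (c : Char) : Char := if c = '\n' then ' ' else c

theorem pvReplaceGo_eq (fuel : Nat) : ∀ (l acc : List Char), l.length ≤ fuel →
    PySem.Chars.replace.go ['\n'] [' '] fuel l acc = acc.reverse ++ l.map pvSubst := by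
  induction fuel with
  | zero => intro l acc h; cases l <;> simp_all [PySem.Chars.replace.go]
  | succ n ih =>
    intro l acc h
    cases l with
    | nil => simp [PySem.Chars.replace.go]
    | cons c t =>
      simp only [PySem.Chars.replace.go]
      by_cases hc : c = '\n'
      · subst hc
        have : List.isPrefixOf ['\n'] ('\n' :: t) = true := by simp [List.isPrefixOf]
        rw [if_pos this, ih _ _ (by simpa using Nat.le_of_succ_le_succ h)]
        simp [pvSubst]
      · have : List.isPrefixOf ['\n'] (c :: t) = false := by
          simp [List.isPrefixOf]; exact fun h' => absurd h'.symm hc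
        rw [if_neg (by simp [this]), ih _ _ (by simpa using Nat.le_of_succ_le_succ h)]
        simp [pvSubst, hc]

theorem pvReplace_eq_map (cs : List Char) :
    PySem.Chars.replace cs ['\n'] [' '] = cs.map pvSubst := by
  simp [PySem.Chars.replace, pvReplaceGo_eq cs.length cs [] le_rfl]

theorem pvStrReplace_eq (s : String) :
    PySem.Str.replace s "\n" " " = String.ofList (s.toList.map pvSubst) := by
  simp only [PySem.Str.replace, show ("\n" : String).toList = ['\n'] from rfl,
    show (" " : String).toList = [' '] from rfl, pvReplace_eq_map]

theorem pvSubst_no_newline (cs : List Char) : '\n' ∉ cs.map pvSubst := by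
  intro h
  obtain ⟨c, _, hc⟩ := List.mem_map.mp h
  by_cases h' : c = '\n' <;> simp [pvSubst, h'] at hc

theorem pvMap_subst_id (cs : List Char) (h : '\n' ∉ cs) : cs.map pvSubst = cs := by
  induction cs with
  | nil => rfl
  | cons c t ih =>
    simp only [List.mem_cons, not_or] at h
    simp only [List.map_cons, ih h.2, pvSubst, List.cons.injEq, and_true]
    split_ifs with hc
    · exact absurd hc.symm h.1
    · rfl

-- pyGet? succeeds on indices in [-len, len)
theorem pvGet_isSome (xs : List String) (i : Int) (h1 : -(xs.length:Int) ≤ i) (h2 : i < xs.length) :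
    (PySem.List.pyGet? xs i).isSome := by
  simp only [PySem.List.pyGet?, PySem.List.pyIdx?]
  split_ifs <;> simp_all
  omega

theorem pvFindStop_mem (list : List String) (idxs : List Int) (stop : Int)
    (h : pvFindStop list idxs = some stop) : stop ∈ idxs := by
  induction idxs with
  | nil => simp [pvFindStop] at h
  | cons i rest ih =>
    simp only [pvFindStop] at h
    cases hg : PySem.List.pyGet? list (i - 1) with
    | none => rw [hg] at h; simp at h
    | some prev =>
      rw [hg] at h
      simp only at h
      by_cases hp : PySem.Str.startswith prev "\n"
      · rw [if_pos hp] at h; simp at h; simp [h]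
      · rw [if_neg hp] at h; exact List.mem_cons_of_mem _ (ih h)

-- the filtered parts collected by B over range(a, stop)
def pvParts (list : List String) (a stop : Int) : List String :=
  (PySem.List.pyRange a stop 1).filterMap (fun j =>
    match PySem.List.pyGet? list j with
    | none => none
    | some s => if PySem.Str.startswith s "\n" then none else some s)

theorem pvCharsJoin_cons (x : List Char) (J : List (List Char)) :
    PySem.Chars.join [] (x :: J) = x ++ PySem.Chars.join [] J := by
  simp only [PySem.Chars.join, List.intercalate]
  cases J <;> simp [List.intersperse]

theorem pvSubst_idem (c : Char) : pvSubst (pvSubst c) = pvSubst c := by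
  by_cases h : c = '\n' <;> simp [pvSubst, h]

-- the key string identity: B's single replace at the end equals A's incremental replaces
theorem pvReplace_key (text cur : String) (J : String) :
    PySem.Str.replace (PySem.Str.replace (text ++ cur) "\n" " " ++ J) "\n" " "
      = PySem.Str.replace ((text ++ cur) ++ J) "\n" " " := by
  simp only [pvStrReplace_eq]
  congr 1
  simp [String.toList_append, String.toList_ofList, Function.comp_def, pvSubst_idem]

theorem pvMain (list : List String) (k : Nat) : ∀ (a : Int) (text : String),
    ((list.length : Int) - a).toNat ≤ k →
    1 - (list.length : Int) ≤ a →
    '\n' ∉ text.toList →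
    pvLoopA list (PySem.List.pyRange a (list.length : Int) 1) text =
      match pvFindStop list (PySem.List.pyRange a (list.length : Int) 1) with
      | none => none
      | some stop => some (PySem.Str.slice
          (PySem.Str.replace (text ++ PySem.Str.join "" (pvParts list a stop)) "\n" " ")
          none (some (-1))) := by
  induction k with
  | zero =>
    intro a text hk h1 ht
    rw [PySem.List.pyRange_one_eq_nil (by omega)]
    rfl
  | succ n ih =>
    intro a text hk h1 ht
    by_cases hab : a < (list.length : Int)
    case neg =>
      rw [PySem.List.pyRange_one_eq_nil (by omega)]
      rfl
    case pos =>
      rw [PySem.List.pyRange_one_cons hab]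
      obtain ⟨prev, hprev⟩ := Option.isSome_iff_exists.mp
        (pvGet_isSome list (a - 1) (by omega) (by omega))
      simp only [pvLoopA, pvFindStop, hprev]
      by_cases hp : PySem.Str.startswith prev "\n"
      · rw [if_pos hp, if_pos hp]
        have hparts : pvParts list a a = [] := by
          simp [pvParts, PySem.List.pyRange_one_eq_nil (le_refl a)]
        simp only [hparts]
        have hj : text ++ PySem.Str.join "" ([] : List String) = text := by
          simp [PySem.Str.join, PySem.Chars.join_nil]
        rw [hj, pvStrReplace_eq, pvMap_subst_id _ ht, String.ofList_toList]
      · rw [if_neg hp, if_neg hp]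
        obtain ⟨cur, hcur⟩ := Option.isSome_iff_exists.mp
          (pvGet_isSome list a (by omega) (by omega))
        simp only [hcur]
        have hrec : ∀ text', '\n' ∉ text'.toList →
            pvLoopA list (PySem.List.pyRange (a + 1) (list.length : Int) 1) text' =
              match pvFindStop list (PySem.List.pyRange (a + 1) (list.length : Int) 1) with
              | none => none
              | some stop => some (PySem.Str.slice
                  (PySem.Str.replace (text' ++ PySem.Str.join "" (pvParts list (a + 1) stop)) "\n" " ")
                  none (some (-1))) :=
          fun text' ht' => ih (a + 1) text' (by omega) (by omega) ht'
        have hstop : ∀ stop, pvFindStop list (PySem.List.pyRange (a + 1) (list.length : Int) 1) = some stop →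
            a + 1 ≤ stop := by
          intro stop hs
          have := pvFindStop_mem list _ _ hs
          exact (PySem.List.mem_pyRange_one.mp this).1
        by_cases hc : PySem.Str.startswith cur "\n"
        · -- skipped element: text unchanged
          have hcC : PySem.Chars.startswith cur.toList ['\n'] = true := by simpa using hc
          rw [if_neg (by simp [hcC])]
          rw [hrec text ht]
          cases hfs : pvFindStop list (PySem.List.pyRange (a + 1) (list.length : Int) 1) with
          | none => rfl
          | some stop =>
            have ha1 : a + 1 ≤ stop := hstop stop hfs
            have hps : pvParts list a stop = pvParts list (a + 1) stop := by
              unfold pvParts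
              rw [PySem.List.pyRange_one_cons (by omega), List.filterMap_cons, hcur]
              simp [hcC]
            simp only [hps]
        · -- kept element: accumulate cur and replace
          have hcC : PySem.Chars.startswith cur.toList ['\n'] = false := by simpa using hc
          rw [if_pos (by simp [hcC])]
          have htext' : '\n' ∉ (PySem.Str.replace (text ++ cur) "\n" " ").toList := by
            rw [pvStrReplace_eq, String.toList_ofList]
            exact pvSubst_no_newline _
          rw [hrec _ htext']
          cases hfs : pvFindStop list (PySem.List.pyRange (a + 1) (list.length : Int) 1) with
          | none => rfl
          | some stop =>
            have ha1 : a + 1 ≤ stop := hstop stop hfs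
            have hps : pvParts list a stop = cur :: pvParts list (a + 1) stop := by
              unfold pvParts
              rw [PySem.List.pyRange_one_cons (by omega), List.filterMap_cons, hcur]
              simp [hcC]
            have hjoin : text ++ PySem.Str.join "" (cur :: pvParts list (a + 1) stop)
                = (text ++ cur) ++ PySem.Str.join "" (pvParts list (a + 1) stop) := by
              apply String.toList_inj.mp
              simp [String.toList_append, pvCharsJoin_cons]
            simp only [hps, hjoin, pvReplace_key]

-- ===== VERDICT (by name: the statement is the Claim_ definition above) =====
theorem get_text_by_index_spec : Claim_equal_get_text_by_index := by
  intro list start_index _ hpre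
  unfold Spec_get_text_by_index get_text_by_index get_text_by_index_alt
  rcases hpre with h | h
  · rw [pvMain list ((list.length : Int) - start_index).toNat start_index "" le_rfl h (by simp)]
    cases hs : pvFindStop list (PySem.List.pyRange start_index (list.length : Int) 1) with
    | none => rfl
    | some stop => simp [pvParts]
  · rw [PySem.List.pyRange_one_eq_nil h]
    rfl
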